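-- pv_equiv track=rewrite | github.com/zhengzhent/MegaCQA | construction/QA/radar.py | get_dim_over_result
-- ===== SOURCE A (Python) =====
-- def get_indices_greater_than_col(data, col_index, x):
--     if not data or col_index < 0 or col_index >= len(data[0]):
--         raise ValueError("列索引超出范围或数据为空")
--     indices = [i for i, row in enumerate(data) if row[col_index] >= x]
--     return indices if indices else "None"
--
-- def get_dim_over_result(data, col_index, labels, threshold=50):
--     indices = get_indices_greater_than_col(data, col_index, threshold)
--     if indices == "None":
--         return f"None is over {threshold}"
--     else:
--         result_list = []
--         for idx in indices:
--             result_list.append(f"{{{labels[idx]}}} is {{{data[idx][col_index]}}}")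
--         return ", ".join(result_list)
-- ===== SOURCE B (Python) =====
-- def get_dim_over_result(data, col_index, labels, threshold=50):
--     if not data or col_index < 0 or col_index >= len(data[0]):
--         raise ValueError("列索引超出范围或数据为空")
--     acc = None
--     for label, row in reversed(list(zip(labels, data))):
--         v = row[col_index]
--         if v >= threshold:
--             head = f"{{{label}}} is {{{v}}}"
--             acc = head if acc is None else head + ", " + acc
--     return f"None is over {threshold}" if acc is None else acc
-- ===== Notes on version B (the rewrite author's own statement) =====
-- stated objective: alternative
-- what changed: B builds the result string back-to-front in one reverse pass over zip(labels, data) with an Optional string accumulator (separator prepended when the accumulator exists), eliminating A's index list, its 'None' sentinel string, the second re-indexing format pass, the parts list and the join.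
import Mathlib
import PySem

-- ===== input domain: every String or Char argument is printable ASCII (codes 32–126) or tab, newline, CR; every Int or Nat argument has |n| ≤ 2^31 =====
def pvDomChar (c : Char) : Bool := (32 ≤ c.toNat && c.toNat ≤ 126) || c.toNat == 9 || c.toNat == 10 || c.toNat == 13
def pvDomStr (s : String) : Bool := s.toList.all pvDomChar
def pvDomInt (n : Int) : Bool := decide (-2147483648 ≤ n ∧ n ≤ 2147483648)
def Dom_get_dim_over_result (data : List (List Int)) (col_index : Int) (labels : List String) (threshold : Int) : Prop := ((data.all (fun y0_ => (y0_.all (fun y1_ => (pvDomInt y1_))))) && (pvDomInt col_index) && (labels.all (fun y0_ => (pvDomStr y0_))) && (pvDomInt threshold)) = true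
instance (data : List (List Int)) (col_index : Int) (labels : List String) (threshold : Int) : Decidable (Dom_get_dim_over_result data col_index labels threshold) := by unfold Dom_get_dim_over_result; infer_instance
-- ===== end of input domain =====

-- B replaces A's staged passes (index list with a "None" sentinel, then a re-indexing format
-- pass, a parts list and a join) by one reverse pass over zip(labels, data) that builds the
-- result string back-to-front in an Optional accumulator; objective: alternative decomposition.

-- ===== PORT A =====
-- helper: Python returns either the index list or the string "None"; Sum mirrors that.
-- The raise branch is excluded by Pre_; pyGet? defaults are only reached outside Pre_.
def get_indices_greater_than_col (data : List (List Int)) (col_index : Int) (x : Int) : Sum (List Int) String :=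
  let indices := (PySem.List.enumerate data 0).filterMap
    (fun p => if (PySem.List.pyGet? p.2 col_index).getD 0 ≥ x then some p.1 else none)
  if indices = [] then Sum.inr "None" else Sum.inl indices

def get_dim_over_result (data : List (List Int)) (col_index : Int) (labels : List String) (threshold : Int) : String :=
  match get_indices_greater_than_col data col_index threshold with
  | Sum.inr _ => "None is over " ++ PySem.Int.toStr threshold
  | Sum.inl indices =>
      let result_list := indices.map (fun idx =>
        "{" ++ (PySem.List.pyGet? labels idx).getD "" ++ "} is {" ++
        PySem.Int.toStr ((PySem.List.pyGet? ((PySem.List.pyGet? data idx).getD []) col_index).getD 0) ++ "}")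
      PySem.Str.join ", " result_list

-- ===== PORT B =====
-- one reverse pass over zip(labels, data); acc = None until a matching row is seen
def get_dim_over_result_alt (data : List (List Int)) (col_index : Int) (labels : List String) (threshold : Int) : String :=
  let acc := ((labels.zip data).reverse).foldl
    (fun acc p =>
      let v := (PySem.List.pyGet? p.2 col_index).getD 0
      if v ≥ threshold then
        some (match acc with
          | none => "{" ++ p.1 ++ "} is {" ++ PySem.Int.toStr v ++ "}"
          | some s => "{" ++ p.1 ++ "} is {" ++ PySem.Int.toStr v ++ "}" ++ ", " ++ s)
      else acc) (none : Option String)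
  match acc with
  | none => "None is over " ++ PySem.Int.toStr threshold
  | some s => s

-- ===== PRECONDITION & SPEC =====
-- Pre_ excludes exactly the inputs on which the Python raises: empty data / col_index out of
-- range of the first row (explicit ValueError), a later row too short (IndexError), or a
-- matching row whose index has no label (IndexError).
def Pre_get_dim_over_result (data : List (List Int)) (col_index : Int) (labels : List String) (threshold : Int) : Prop :=
  data ≠ [] ∧ 0 ≤ col_index ∧ col_index < ((data.headD []).length : Int) ∧
  (∀ row ∈ data, col_index < (row.length : Int)) ∧
  (∀ p ∈ PySem.List.enumerate data 0,
     (PySem.List.pyGet? p.2 col_index).getD 0 ≥ threshold → p.1 < (labels.length : Int))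
instance (data : List (List Int)) (col_index : Int) (labels : List String) (threshold : Int) : Decidable (Pre_get_dim_over_result data col_index labels threshold) := by unfold Pre_get_dim_over_result; infer_instance

def pvWitness_get_dim_over_result : List (List Int) × Int × List String × Int := ([[3, 1], [7, 2]], 0, ["a", "b"], 5)

def Spec_get_dim_over_result (data : List (List Int)) (col_index : Int) (labels : List String) (threshold : Int) (out : String) : Prop := out = get_dim_over_result_alt data col_index labels threshold
instance (data : List (List Int)) (col_index : Int) (labels : List String) (threshold : Int) (out : String) : Decidable (Spec_get_dim_over_result data col_index labels threshold out) := by unfold Spec_get_dim_over_result; infer_instance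

-- ===== CLAIM (what is proved, stated in full; the proofs are below) =====
def Claim_equal_get_dim_over_result : Prop := ∀ (data : List (List Int)) (col_index : Int) (labels : List String) (threshold : Int), Dom_get_dim_over_result data col_index labels threshold → Pre_get_dim_over_result data col_index labels threshold → Spec_get_dim_over_result data col_index labels threshold (get_dim_over_result data col_index labels threshold)

-- ===== LEMMAS AND PROOFS =====
-- the formatted string of one row, as A computes it after re-indexing is removed
def pvFmt (c : Int) (label : String) (row : List Int) : String :=
  "{" ++ label ++ "} is {" ++ PySem.Int.toStr ((PySem.List.pyGet? row c).getD 0) ++ "}"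

-- B's per-pair contribution as an Option
def pvG (c t : Int) (p : String × List Int) : Option String :=
  if (PySem.List.pyGet? p.2 c).getD 0 ≥ t then some (pvFmt c p.1 p.2) else none

theorem pv_filterMap_if {α β : Type} (l : List α) (p : α → Prop) [DecidablePred p] (g : α → β) :
    l.filterMap (fun x => if p x then some (g x) else none) = (l.filter (fun x => decide (p x))).map g := by
  induction l with
  | nil => simp
  | cons x xs ih => by_cases h : p x <;> simp [h, ih]

theorem pv_join_cons (x y : String) (ys : List String) :
    PySem.Str.join ", " (x :: y :: ys) = x ++ ", " ++ PySem.Str.join ", " (y :: ys) := by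
  apply String.toList_injective
  simp [PySem.Str.toList_join, PySem.Chars.join_cons_cons]

theorem pv_join_singleton (x : String) : PySem.Str.join ", " [x] = x := by
  apply String.toList_injective
  simp [PySem.Str.toList_join, PySem.Chars.join_singleton]

-- B's fold computes the ", "-join of the surviving formatted strings (none if there are none)
theorem pv_foldr_eq (c t : Int) (l : List (String × List Int)) :
    l.foldr (fun p acc =>
      let v := (PySem.List.pyGet? p.2 c).getD 0
      if v ≥ t then
        some (match acc with
          | none => "{" ++ p.1 ++ "} is {" ++ PySem.Int.toStr v ++ "}"
          | some s => "{" ++ p.1 ++ "} is {" ++ PySem.Int.toStr v ++ "}" ++ ", " ++ s)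
      else acc) none
    = (match l.filterMap (pvG c t) with
       | [] => none
       | ps => some (PySem.Str.join ", " ps)) := by
  induction l with
  | nil => simp
  | cons p l ih =>
    simp only [List.foldr_cons, List.filterMap_cons, ih]
    by_cases h : (PySem.List.pyGet? p.2 c).getD 0 ≥ t
    · have hg : pvG c t p = some (pvFmt c p.1 p.2) := by simp [pvG, h]
      rw [hg]
      cases hfm : l.filterMap (pvG c t) with
      | nil => simp [h, pvFmt, pv_join_singleton]
      | cons q qs => simp only [if_pos h, pvFmt]; rw [pv_join_cons]
    · have hg : pvG c t p = none := by simp [pvG, h]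
      rw [hg]; simp [h]

-- A's formatted list over the filtered enumeration equals B's filterMap over zip(labels, data),
-- provided every matching index has a label.
theorem pv_parts_eq (c t : Int) (data : List (List Int)) :
    ∀ (labels : List String) (n : Nat),
    (∀ k (hk : k < data.length),
        (PySem.List.pyGet? data[k] c).getD 0 ≥ t → n + k < labels.length) →
    ((PySem.List.enumerate data (n : Int)).filter
        (fun p => decide ((PySem.List.pyGet? p.2 c).getD 0 ≥ t))).map
      (fun p => pvFmt c ((PySem.List.pyGet? labels p.1).getD "") p.2)
    = ((labels.drop n).zip data).filterMap (pvG c t) := by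
  induction data with
  | nil => intro labels n _; simp [PySem.List.enumerate_nil]
  | cons x xs ih =>
    intro labels n h
    rw [PySem.List.enumerate_cons]
    by_cases hn : n < labels.length
    · rw [List.drop_eq_getElem_cons hn]
      have ih' := ih labels (n + 1) (fun k hk hc => by
        have := h (k + 1) (by simpa using Nat.succ_lt_succ hk) (by simpa using hc)
        omega)
      by_cases hc : (PySem.List.pyGet? x c).getD 0 ≥ t
      · simp only [List.filter_cons, List.zip_cons_cons, List.filterMap_cons]
        rw [if_pos (by simpa using hc)]
        simp only [List.map_cons, pvG, if_pos hc]
        have hcast : ((n : Int) + 1) = ((n + 1 : Nat) : Int) := by push_cast; ring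
        rw [hcast, ih']
        simp only [PySem.List.pyGet?_natCast, List.getElem?_eq_getElem hn, Option.getD_some]
        rfl
      · simp only [List.filter_cons, List.zip_cons_cons, List.filterMap_cons]
        rw [if_neg (by simpa using hc)]
        simp only [pvG, if_neg hc]
        have hcast : ((n : Int) + 1) = ((n + 1 : Nat) : Int) := by push_cast; ring
        rw [hcast, ih']
        rfl
    · have hx : ¬ ((PySem.List.pyGet? x c).getD 0 ≥ t) := fun hc => hn (by
        have := h 0 (by simp) (by simpa using hc); omega)
      have hdrop : labels.drop n = [] := List.drop_eq_nil_of_le (by omega)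
      have hdrop1 : labels.drop (n + 1) = [] := List.drop_eq_nil_of_le (by omega)
      have ih' := ih labels (n + 1) (fun k hk hc => by
        have := h (k + 1) (by simpa using Nat.succ_lt_succ hk) (by simpa using hc)
        omega)
      simp only [List.filter_cons]
      rw [if_neg (by simpa using hx)]
      have hcast : ((n : Int) + 1) = ((n + 1 : Nat) : Int) := by push_cast; ring
      rw [hcast, ih', hdrop, hdrop1]
      simp

theorem pv_fmt_eq (data : List (List Int)) (col_index : Int) (labels : List String) (p : Int × List Int)
    (hp : p ∈ PySem.List.enumerate data 0) :
    "{" ++ (PySem.List.pyGet? labels p.1).getD "" ++ "} is {" ++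
      PySem.Int.toStr ((PySem.List.pyGet? ((PySem.List.pyGet? data p.1).getD []) col_index).getD 0) ++ "}"
    = pvFmt col_index ((PySem.List.pyGet? labels p.1).getD "") p.2 := by
  rw [PySem.List.mem_enumerate_iff] at hp
  obtain ⟨k, hk, rfl⟩ := hp
  simp [pvFmt, PySem.List.pyGet?_natCast, List.getElem?_eq_getElem hk]

-- ===== VERDICT (by name: the statement is the Claim_ definition above) =====
theorem get_dim_over_result_spec : Claim_equal_get_dim_over_result := by
  intro data col_index labels threshold _hdom hpre
  obtain ⟨-, -, -, -, hlab⟩ := hpre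
  unfold Spec_get_dim_over_result get_dim_over_result get_dim_over_result_alt get_indices_greater_than_col
  have hcond : ∀ k (hk : k < data.length),
      (PySem.List.pyGet? data[k] col_index).getD 0 ≥ threshold → 0 + k < labels.length := by
    intro k hk hc
    have hp : ((0 : Int) + k, data[k]) ∈ PySem.List.enumerate data 0 :=
      (PySem.List.mem_enumerate_iff _ _ _).mpr ⟨k, hk, rfl⟩
    have := hlab _ hp (by simpa using hc)
    simp at this
    omega
  have hparts := pv_parts_eq col_index threshold data labels 0 hcond
  simp only [Nat.cast_zero, List.drop_zero] at hparts
  rw [List.foldl_reverse, pv_foldr_eq, ← hparts, pv_filterMap_if]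
  by_cases hflt : (PySem.List.enumerate data 0).filter
      (fun p => decide ((PySem.List.pyGet? p.2 col_index).getD 0 ≥ threshold)) = []
  · simp [hflt]
  · rw [if_neg (by simpa using hflt)]
    cases hf : (PySem.List.enumerate data 0).filter
        (fun p => decide ((PySem.List.pyGet? p.2 col_index).getD 0 ≥ threshold)) with
    | nil => exact absurd hf hflt
    | cons q qs =>
      have hmem : ∀ p ∈ q :: qs, p ∈ PySem.List.enumerate data 0 := by
        intro p hp; rw [← hf] at hp; exact List.mem_of_mem_filter hp
      show PySem.Str.join ", " (List.map _ (List.map Prod.fst (q :: qs)))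
          = PySem.Str.join ", " (List.map _ (q :: qs))
      rw [List.map_map]
      exact congrArg _ (List.map_congr_left fun p hp =>
        pv_fmt_eq data col_index labels p (hmem p hp))
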